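-- pv_equiv track=rewrite | github.com/tboschi/advent-of-code-2024 | day14/part1.py | count_robots
-- ===== SOURCE A (Python) =====
-- import math
--
-- Pair = tuple[int, int]
--
-- def count_robots(robots: list[Pair], shape: Pair) -> int:
--     counts = {(0, 0): 0, (0, 1): 0, (1, 0): 0, (1, 1): 0}
--
--     w, h = shape[0] // 2, shape[1] // 2
--     for x, y in robots:
--         if x == w or y == h:
--             continue
--         counts[(x > w, y > h)] += 1
--
--     return math.prod(counts.values())
-- ===== SOURCE B (Python) =====
-- def count_robots(robots, shape):
--     w, h = shape[0] // 2, shape[1] // 2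
--     q1 = sum(1 for x, y in robots if x < w and y < h)
--     q2 = sum(1 for x, y in robots if x < w and y > h)
--     q3 = sum(1 for x, y in robots if x > w and y < h)
--     q4 = sum(1 for x, y in robots if x > w and y > h)
--     return q1 * q2 * q3 * q4
-- ===== Notes on version B (the rewrite author's own statement) =====
-- stated objective: simpler
-- what changed: Replaces the quadrant-keyed dict accumulated in one loop (with a continue for center-line robots) by four independent strict-inequality count scans whose product is returned.
import Mathlib
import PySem

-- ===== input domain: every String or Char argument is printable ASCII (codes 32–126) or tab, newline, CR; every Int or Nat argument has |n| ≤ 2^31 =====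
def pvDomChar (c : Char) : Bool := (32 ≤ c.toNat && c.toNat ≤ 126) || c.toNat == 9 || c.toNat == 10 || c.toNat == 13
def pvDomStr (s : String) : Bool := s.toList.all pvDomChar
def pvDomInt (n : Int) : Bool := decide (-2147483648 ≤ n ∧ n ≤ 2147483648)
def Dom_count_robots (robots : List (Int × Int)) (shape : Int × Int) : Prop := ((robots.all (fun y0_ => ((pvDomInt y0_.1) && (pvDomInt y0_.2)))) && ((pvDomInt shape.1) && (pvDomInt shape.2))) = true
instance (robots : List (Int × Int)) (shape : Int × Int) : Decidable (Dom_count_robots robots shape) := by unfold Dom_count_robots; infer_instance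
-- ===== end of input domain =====

-- B replaces A's quadrant-keyed dict loop by four independent strict-inequality count
-- scans whose product is returned (objective: simpler decomposition, same cost).

-- ===== PORT A =====
-- loop body: 'if x == w or y == h: continue' else 'counts[(x > w, y > h)] += 1'
-- (the key is always present, so 'counts[k] += 1' agrees with Dict.modify with default 0)
def cr_step (w h : Int) (c : PySem.Dict (Bool × Bool) Int) (p : Int × Int) :
    PySem.Dict (Bool × Bool) Int :=
  if p.1 = w ∨ p.2 = h then c
  else c.modify (decide (p.1 > w), decide (p.2 > h)) 0 (· + 1)

def count_robots (robots : List (Int × Int)) (shape : Int × Int) : Int :=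
  -- counts = {(0, 0): 0, (0, 1): 0, (1, 0): 0, (1, 1): 0}  (0/1 keys compare equal to bools in Python)
  let counts : PySem.Dict (Bool × Bool) Int :=
    PySem.Dict.ofList [((false, false), 0), ((false, true), 0), ((true, false), 0), ((true, true), 0)]
  let w := PySem.Int.floordiv shape.1 2
  let h := PySem.Int.floordiv shape.2 2
  let counts := robots.foldl (cr_step w h) counts
  -- math.prod(counts.values())
  counts.values.foldl (· * ·) 1

-- ===== PORT B =====
def count_robots_alt (robots : List (Int × Int)) (shape : Int × Int) : Int :=
  let w := PySem.Int.floordiv shape.1 2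
  let h := PySem.Int.floordiv shape.2 2
  let q1 : Int := (robots.countP (fun p => decide (p.1 < w) && decide (p.2 < h)) : Nat)
  let q2 : Int := (robots.countP (fun p => decide (p.1 < w) && decide (p.2 > h)) : Nat)
  let q3 : Int := (robots.countP (fun p => decide (p.1 > w) && decide (p.2 < h)) : Nat)
  let q4 : Int := (robots.countP (fun p => decide (p.1 > w) && decide (p.2 > h)) : Nat)
  q1 * q2 * q3 * q4

-- ===== PRECONDITION & SPEC =====
def Spec_count_robots (robots : List (Int × Int)) (shape : Int × Int) (out : Int) : Prop := out = count_robots_alt robots shape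
instance (robots : List (Int × Int)) (shape : Int × Int) (out : Int) : Decidable (Spec_count_robots robots shape out) := by unfold Spec_count_robots; infer_instance

-- ===== CLAIM (what is proved, stated in full; the proofs are below) =====
def Claim_equal_count_robots : Prop := ∀ (robots : List (Int × Int)) (shape : Int × Int), Dom_count_robots robots shape → Spec_count_robots robots shape (count_robots robots shape)

-- ===== LEMMAS AND PROOFS =====

-- Invariant of A's loop: starting from slot values a b c d, the product of the final
-- dict's values is the product of each slot plus its strict-quadrant count.
lemma cr_loop_prod (w h : Int) (robots : List (Int × Int)) :
    ∀ (a b c d : Int),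
      ((robots.foldl (cr_step w h)
          (PySem.Dict.mk [((false, false), a), ((false, true), b),
                          ((true, false), c), ((true, true), d)])).values).foldl (· * ·) 1
      = (a + (robots.countP (fun p => decide (p.1 < w) && decide (p.2 < h)) : Nat))
        * (b + (robots.countP (fun p => decide (p.1 < w) && decide (p.2 > h)) : Nat))
        * (c + (robots.countP (fun p => decide (p.1 > w) && decide (p.2 < h)) : Nat))
        * (d + (robots.countP (fun p => decide (p.1 > w) && decide (p.2 > h)) : Nat)) := by
  induction robots with
  | nil =>
      intro a b c d
      simp [PySem.Dict.values, List.foldl]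
  | cons p rs ih =>
      intro a b c d
      obtain ⟨x, y⟩ := p
      by_cases hx : x = w
      · simp [List.foldl, cr_step, hx, ih]
      · by_cases hy : y = h
        · simp [List.foldl, cr_step, hx, hy, ih]
        · rcases lt_trichotomy x w with hxw | hxw | hxw
          · rcases lt_trichotomy y h with hyh | hyh | hyh
            · have hstep : cr_step w h (PySem.Dict.mk [((false, false), a), ((false, true), b),
                  ((true, false), c), ((true, true), d)]) (x, y)
                  = PySem.Dict.mk [((false, false), a + 1), ((false, true), b),
                  ((true, false), c), ((true, true), d)] := by
                simp [cr_step, hx, hy, not_lt_of_gt, hxw, hyh,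
                  PySem.Dict.modify, PySem.Dict.insert, PySem.Dict.getD,
                  PySem.Dict.get?, PySem.Dict.contains]
              have e1 : (decide (x < w) && decide (y < h)) = true := by simp; omega
              have e2 : (decide (x < w) && decide (y > h)) = false := by simp; omega
              have e3 : (decide (x > w) && decide (y < h)) = false := by simp; omega
              have e4 : (decide (x > w) && decide (y > h)) = false := by simp; omega
              rw [List.foldl_cons, hstep]
              simp only [ih, List.countP_cons, e1, e2, e3, e4, if_true, Bool.false_eq_true, if_false]
              push_cast; ring
            · exact absurd hyh hy
            · have hstep : cr_step w h (PySem.Dict.mk [((false, false), a), ((false, true), b),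
                  ((true, false), c), ((true, true), d)]) (x, y)
                  = PySem.Dict.mk [((false, false), a), ((false, true), b + 1),
                  ((true, false), c), ((true, true), d)] := by
                simp [cr_step, hx, hy, not_lt_of_gt, hxw, hyh,
                  PySem.Dict.modify, PySem.Dict.insert, PySem.Dict.getD,
                  PySem.Dict.get?, PySem.Dict.contains]
              have e1 : (decide (x < w) && decide (y < h)) = false := by simp; omega
              have e2 : (decide (x < w) && decide (y > h)) = true := by simp; omega
              have e3 : (decide (x > w) && decide (y < h)) = false := by simp; omega
              have e4 : (decide (x > w) && decide (y > h)) = false := by simp; omega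
              rw [List.foldl_cons, hstep]
              simp only [ih, List.countP_cons, e1, e2, e3, e4, if_true, Bool.false_eq_true, if_false]
              push_cast; ring
          · exact absurd hxw hx
          · rcases lt_trichotomy y h with hyh | hyh | hyh
            · have hstep : cr_step w h (PySem.Dict.mk [((false, false), a), ((false, true), b),
                  ((true, false), c), ((true, true), d)]) (x, y)
                  = PySem.Dict.mk [((false, false), a), ((false, true), b),
                  ((true, false), c + 1), ((true, true), d)] := by
                simp [cr_step, hx, hy, not_lt_of_gt, hxw, hyh,
                  PySem.Dict.modify, PySem.Dict.insert, PySem.Dict.getD,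
                  PySem.Dict.get?, PySem.Dict.contains]
              have e1 : (decide (x < w) && decide (y < h)) = false := by simp; omega
              have e2 : (decide (x < w) && decide (y > h)) = false := by simp; omega
              have e3 : (decide (x > w) && decide (y < h)) = true := by simp; omega
              have e4 : (decide (x > w) && decide (y > h)) = false := by simp; omega
              rw [List.foldl_cons, hstep]
              simp only [ih, List.countP_cons, e1, e2, e3, e4, if_true, Bool.false_eq_true, if_false]
              push_cast; ring
            · exact absurd hyh hy
            · have hstep : cr_step w h (PySem.Dict.mk [((false, false), a), ((false, true), b),
                  ((true, false), c), ((true, true), d)]) (x, y)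
                  = PySem.Dict.mk [((false, false), a), ((false, true), b),
                  ((true, false), c), ((true, true), d + 1)] := by
                simp [cr_step, hx, hy, hxw, hyh,
                  PySem.Dict.modify, PySem.Dict.insert, PySem.Dict.getD,
                  PySem.Dict.get?, PySem.Dict.contains]
              have e1 : (decide (x < w) && decide (y < h)) = false := by simp; omega
              have e2 : (decide (x < w) && decide (y > h)) = false := by simp; omega
              have e3 : (decide (x > w) && decide (y < h)) = false := by simp; omega
              have e4 : (decide (x > w) && decide (y > h)) = true := by simp; omega
              rw [List.foldl_cons, hstep]
              simp only [ih, List.countP_cons, e1, e2, e3, e4, if_true, Bool.false_eq_true, if_false]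
              push_cast; ring

lemma cr_ofList_eq :
    (PySem.Dict.ofList [(((false : Bool), (false : Bool)), (0 : Int)), ((false, true), 0),
      ((true, false), 0), ((true, true), 0)])
    = PySem.Dict.mk [((false, false), 0), ((false, true), 0), ((true, false), 0), ((true, true), 0)] := by
  decide

-- ===== VERDICT (by name: the statement is the Claim_ definition above) =====
theorem count_robots_spec : Claim_equal_count_robots := by
  intro robots shape _
  show count_robots robots shape = count_robots_alt robots shape
  unfold count_robots count_robots_alt
  rw [cr_ofList_eq, cr_loop_prod]
  simp
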